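-- pv_equiv track=rewrite | github.com/vrthra-forks/GLRParser-notebook | testGLR.py | find_rule_containing_key
-- ===== SOURCE A (Python) =====
-- def find_rule_containing_key(g, key, root):
--     leaf = root[0]
--     for rule in g[key]:
--         r = []
--         while rule:
--             token, *rule = rule
--             if leaf != token:
--                 r.append((token, None))
--             else:
--                 return r + [root] + [(t, None) for t in rule]
--     assert False
-- ===== SOURCE B (Python) =====
-- def find_rule_containing_key(g, key, root):
--     leaf = root[0]
--     for rule in g[key]:
--         if leaf in rule:
--             i = rule.index(leaf)
--             return [(t, None) for t in rule[:i]] + [root] + [(t, None) for t in rule[i+1:]]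
--     assert False
-- ===== Notes on version B (the rewrite author's own statement) =====
-- stated objective: simpler
-- what changed: Replaces A's destructuring while-loop that incrementally builds the prefix list with a membership test to select the rule, then index + two slices to reconstruct the result in one expression.
import Mathlib
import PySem

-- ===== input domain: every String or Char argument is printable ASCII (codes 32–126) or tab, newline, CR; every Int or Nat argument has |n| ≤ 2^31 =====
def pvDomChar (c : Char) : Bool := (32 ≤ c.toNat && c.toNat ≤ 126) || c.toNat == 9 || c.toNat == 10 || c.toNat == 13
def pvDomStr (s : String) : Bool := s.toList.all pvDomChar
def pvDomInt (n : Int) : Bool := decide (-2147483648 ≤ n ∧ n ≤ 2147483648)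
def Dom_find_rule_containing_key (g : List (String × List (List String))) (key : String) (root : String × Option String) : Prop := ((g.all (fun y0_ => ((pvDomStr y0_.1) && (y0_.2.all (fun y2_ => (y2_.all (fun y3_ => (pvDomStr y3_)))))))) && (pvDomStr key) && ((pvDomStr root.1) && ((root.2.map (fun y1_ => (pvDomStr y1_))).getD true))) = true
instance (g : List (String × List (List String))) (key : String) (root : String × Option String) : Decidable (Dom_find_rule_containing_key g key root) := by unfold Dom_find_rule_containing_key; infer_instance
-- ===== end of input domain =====

-- B selects the matching rule with a membership test and rebuilds via index + two slices,
-- instead of A's destructuring while-loop that builds the prefix incrementally (objective: simpler).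


-- ===== PORT A =====
-- inner 'while rule:' loop of A, with accumulator r; returns none when the rule is exhausted
def pvAInner (leaf : String) (root : String × Option String)
    (r : List (String × Option String)) : List String → Option (List (String × Option String))
  | [] => none
  | token :: rule =>
    if leaf ≠ token then pvAInner leaf root (r ++ [(token, none)]) rule
    else some (r ++ [root] ++ rule.map (fun t => (t, none)))

-- outer 'for rule in g[key]:' loop of A
def pvAOuter (leaf : String) (root : String × Option String) :
    List (List String) → Option (List (String × Option String))
  | [] => none
  | rule :: rules =>
    match pvAInner leaf root [] rule with
    | some v => some v
    | none => pvAOuter leaf root rules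

-- KeyError on g[key] and the final 'assert False' raise in Python: the port returns [] there,
-- exactly the inputs excluded by Pre_ below.
def find_rule_containing_key (g : List (String × List (List String))) (key : String) (root : String × Option String) : List (String × Option String) :=
  match (g.find? (fun p => p.1 == key)).map (fun p => p.2) with
  | none => []
  | some rules => (pvAOuter root.1 root rules).getD []

-- ===== PORT B =====
-- reconstruction from the selected rule: i = rule.index(leaf); slices rule[:i] and rule[i+1:]
def pvBBuild (leaf : String) (root : String × Option String) (rule : List String) : List (String × Option String) :=
  match PySem.List.index? rule leaf with
  | none => []   -- unreachable: the rule was selected by 'leaf in rule'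
  | some i => (rule.take i).map (fun t => (t, none)) ++ [root] ++ (rule.drop (i + 1)).map (fun t => (t, none))

def find_rule_containing_key_alt (g : List (String × List (List String))) (key : String) (root : String × Option String) : List (String × Option String) :=
  match (g.find? (fun p => p.1 == key)).map (fun p => p.2) with
  | none => []
  | some rules =>
    match rules.find? (fun rule => rule.contains root.1) with
    | none => []   -- 'assert False' in Python; outside Pre_
    | some rule => pvBBuild root.1 root rule

-- ===== PRECONDITION & SPEC =====
-- Pre_ = exactly the inputs where the Python A returns: key is present in g (else KeyError)
-- and some rule of g[key] contains root[0] (else AssertionError).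
def Pre_find_rule_containing_key (g : List (String × List (List String))) (key : String) (root : String × Option String) : Prop :=
  ((g.find? (fun p => p.1 == key)).map (fun p => p.2.any (fun rule => rule.contains root.1))).getD false = true
instance (g : List (String × List (List String))) (key : String) (root : String × Option String) : Decidable (Pre_find_rule_containing_key g key root) := by unfold Pre_find_rule_containing_key; infer_instance

def pvWitness_find_rule_containing_key : (List (String × List (List String))) × String × (String × Option String) :=
  ([("S", [["a", "S"], ["x", "S", "y"]])], "S", ("x", none))

def Spec_find_rule_containing_key (g : List (String × List (List String))) (key : String) (root : String × Option String) (out : List (String × Option String)) : Prop := out = find_rule_containing_key_alt g key root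
instance (g : List (String × List (List String))) (key : String) (root : String × Option String) (out : List (String × Option String)) : Decidable (Spec_find_rule_containing_key g key root out) := by unfold Spec_find_rule_containing_key; infer_instance

-- ===== CLAIM (what is proved, stated in full; the proofs are below) =====
def Claim_equal_find_rule_containing_key : Prop := ∀ (g : List (String × List (List String))) (key : String) (root : String × Option String), Dom_find_rule_containing_key g key root → Pre_find_rule_containing_key g key root → Spec_find_rule_containing_key g key root (find_rule_containing_key g key root)

-- ===== LEMMAS AND PROOFS =====

-- A's inner loop computes B's index-and-slices reconstruction (prefixed by the accumulator r)
theorem pvAInner_eq (leaf : String) (root : String × Option String) :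
    ∀ (rule : List String) (r : List (String × Option String)),
      pvAInner leaf root r rule =
        match PySem.List.index? rule leaf with
        | none => none
        | some i => some (r ++ (rule.take i).map (fun t => (t, none)) ++ [root] ++ (rule.drop (i + 1)).map (fun t => (t, none)))
  | [], r => by simp [pvAInner, PySem.List.index?]
  | token :: rule, r => by
    by_cases h : leaf = token
    · subst h
      rw [PySem.List.index?_cons_self]
      simp [pvAInner]
    · rw [PySem.List.index?_cons_of_ne rule (show token ≠ leaf from fun hh => h hh.symm)]
      simp only [pvAInner, if_pos h]
      rw [pvAInner_eq leaf root rule (r ++ [(token, none)])]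
      cases PySem.List.index? rule leaf with
      | none => simp
      | some i => simp [List.take_succ_cons]

-- A's outer loop selects the first rule containing leaf and applies the reconstruction
theorem pvAOuter_eq (leaf : String) (root : String × Option String) :
    ∀ (rules : List (List String)),
      pvAOuter leaf root rules =
        match rules.find? (fun rule => rule.contains leaf) with
        | none => none
        | some rule => some (pvBBuild leaf root rule)
  | [] => by simp [pvAOuter]
  | rule :: rules => by
    by_cases h : leaf ∈ rule
    · have hidx : (PySem.List.index? rule leaf).isSome := (PySem.List.index?_isSome_iff rule leaf).mpr h
      obtain ⟨i, hi⟩ := Option.isSome_iff_exists.mp hidx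
      rw [List.find?_cons_of_pos (by simpa using h)]
      simp only [pvAOuter, pvAInner_eq, hi, pvBBuild]
      simp
    · have hidx : PySem.List.index? rule leaf = none := (PySem.List.index?_eq_none_iff rule leaf).mpr h
      simp only [pvAOuter, pvAInner_eq, hidx]
      rw [List.find?_cons_of_neg (by simpa using h)]
      exact pvAOuter_eq leaf root rules

-- ===== VERDICT (by name: the statement is the Claim_ definition above) =====
theorem find_rule_containing_key_spec : Claim_equal_find_rule_containing_key := by
  intro g key root _hdom hpre
  unfold Spec_find_rule_containing_key
  unfold find_rule_containing_key find_rule_containing_key_alt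
  unfold Pre_find_rule_containing_key at hpre
  cases hfind : g.find? (fun p => p.1 == key) with
  | none => simp [hfind] at hpre
  | some p =>
    simp only [hfind, Option.map_some] at hpre ⊢
    rw [pvAOuter_eq]
    cases hsel : p.2.find? (fun rule => rule.contains root.1) with
    | none =>
      exfalso
      simp only [Option.getD_some, List.any_eq_true] at hpre
      obtain ⟨rule, hmem, hc⟩ := hpre
      have := List.find?_eq_none.mp hsel rule hmem
      simp_all
    | some rule => simp
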